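-- pv_equiv track=rewrite | github.com/GStreamer/cerbero | cerbero/packages/wix.py | _format_id
-- ===== SOURCE A (Python) =====
-- def _format_id(string, replace_dots=False):
--     ret = string
--     ret = ret.replace('_', '__')
--     for r in ['/', '-', ' ', '@', '+']:
--         ret = ret.replace(r, '_')
--     if replace_dots:
--         ret = ret.replace('.', '')
--     # For directories starting with a number
--     ret = '_' + ret
--
--     if len(ret) > 38:
--         return ret[0:37]
--
--     return ret
-- ===== SOURCE B (Python) =====
-- def _format_id(string, replace_dots=False):
--     # Single left-to-right streaming pass with an accumulator and EARLY EXIT: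
--     # as soon as the (already '_'-prefixed) output exceeds 38 characters we know
--     # the truncation branch applies and return its first 37 characters without
--     # looking at the rest of the input.
--     out = ['_']
--     for c in string:
--         if c == '_':
--             out.append('_')
--             out.append('_')
--         elif c in '/- @+':
--             out.append('_')
--         elif c == '.' and replace_dots:
--             pass
--         else:
--             out.append(c)
--         if len(out) > 38:
--             return ''.join(out[:37])
--     return ''.join(out)
-- ===== Notes on version B (the rewrite author's own statement) =====
-- stated objective: faster
-- what changed: One streaming left-to-right pass over the characters with an accumulator and early exit at the 38-character truncation limit, instead of six sequential whole-string replace passes followed by a final truncation.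
import Mathlib
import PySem

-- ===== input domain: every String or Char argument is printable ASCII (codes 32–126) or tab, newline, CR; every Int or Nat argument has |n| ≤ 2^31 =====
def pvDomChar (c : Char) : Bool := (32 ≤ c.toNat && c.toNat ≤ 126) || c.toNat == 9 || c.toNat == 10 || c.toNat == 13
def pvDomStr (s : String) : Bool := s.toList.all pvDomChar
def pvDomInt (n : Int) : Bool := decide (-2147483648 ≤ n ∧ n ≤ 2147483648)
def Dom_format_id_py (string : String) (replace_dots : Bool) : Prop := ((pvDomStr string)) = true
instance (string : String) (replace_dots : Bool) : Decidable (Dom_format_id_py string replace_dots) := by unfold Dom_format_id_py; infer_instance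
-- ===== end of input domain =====

-- B: one streaming pass with an accumulator and early exit at the 38-char truncation
-- limit, instead of A's six whole-string replace passes plus a final truncation.

-- ===== PORT A =====
def format_id_py (string : String) (replace_dots : Bool) : String :=
  let ret := string
  let ret := PySem.Str.replace ret "_" "__"
  let ret := ["/", "-", " ", "@", "+"].foldl (fun r s => PySem.Str.replace r s "_") ret
  let ret := if replace_dots then PySem.Str.replace ret "." "" else ret
  let ret := "_" ++ ret
  if PySem.Str.len ret > 38 then PySem.Str.slice ret (some 0) (some 37) else ret

-- ===== PORT B =====
-- Source B's loop: out is the accumulator (in order); early return once len(out) > 38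
def pvGoB (rd : Bool) : List Char → List Char → List Char
  | [], out => out
  | c :: rest, out =>
    let out :=
      if c = '_' then out ++ ['_', '_']
      else if c = '/' ∨ c = '-' ∨ c = ' ' ∨ c = '@' ∨ c = '+' then out ++ ['_']
      else if c = '.' ∧ rd then out
      else out ++ [c]
    if out.length > 38 then out.take 37 else pvGoB rd rest out

def format_id_py_alt (string : String) (replace_dots : Bool) : String :=
  String.ofList (pvGoB replace_dots string.toList ['_'])

-- ===== PRECONDITION & SPEC =====
def Spec_format_id_py (string : String) (replace_dots : Bool) (out : String) : Prop := out = format_id_py_alt string replace_dots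
instance (string : String) (replace_dots : Bool) (out : String) : Decidable (Spec_format_id_py string replace_dots out) := by unfold Spec_format_id_py; infer_instance

-- ===== CLAIM (what is proved, stated in full; the proofs are below) =====
def Claim_equal_format_id_py : Prop := ∀ (string : String) (replace_dots : Bool), Dom_format_id_py string replace_dots → Spec_format_id_py string replace_dots (format_id_py string replace_dots)

-- ===== LEMMAS AND PROOFS =====

-- per-character effect of A's replacement passes
def pvTr (rd : Bool) (c : Char) : List Char :=
  if c = '_' then ['_', '_']
  else if c = '/' ∨ c = '-' ∨ c = ' ' ∨ c = '@' ∨ c = '+' then ['_']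
  else if rd ∧ c = '.' then []
  else [c]

-- Python replace with a single-character pattern is a per-character flatMap
theorem replace_go_single (a : Char) (new : List Char) :
    ∀ (s : List Char) (fuel : Nat) (acc : List Char), s.length ≤ fuel →
      PySem.Chars.replace.go [a] new fuel s acc
        = acc.reverse ++ s.flatMap (fun c => if c = a then new else [c]) := by
  intro s
  induction s with
  | nil => intro fuel acc _; cases fuel <;> simp [PySem.Chars.replace.go]
  | cons c t ih =>
    intro fuel acc hle
    cases fuel with
    | zero => simp at hle
    | succ n =>
      simp only [PySem.Chars.replace.go]
      by_cases h : c = a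
      · subst h
        have hp : [c].isPrefixOf (c :: t) = true := by simp [List.isPrefixOf]
        simp only [hp, List.length, List.drop_succ_cons, List.drop_zero]
        rw [ih _ _ (by simpa using Nat.le_of_succ_le_succ hle)]
        simp
      · have hp : [a].isPrefixOf (c :: t) = false := by
          simp [List.isPrefixOf, Ne.symm h]
        simp only [hp]
        rw [if_neg (by simp), ih _ _ (Nat.le_of_succ_le_succ hle)]
        simp [h]

theorem replace_single (a : Char) (new s : List Char) :
    PySem.Chars.replace s [a] new
      = s.flatMap (fun c => if c = a then new else [c]) := by
  simp only [PySem.Chars.replace, List.isEmpty_cons, Bool.false_eq_true, if_false]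
  simpa using replace_go_single a new s s.length [] (le_refl _)

-- pointwise: the composition of the six per-character maps is pvTr
theorem comp_tr (rd : Bool) (c : Char) :
    List.flatMap (fun x =>
      List.flatMap (fun x =>
        List.flatMap (fun x =>
          List.flatMap (fun x =>
            List.flatMap (fun x =>
              List.flatMap (fun x => if rd = true then (if x = '.' then ([] : List Char) else [x]) else [x])
                (if x = '+' then ['_'] else [x]))
              (if x = '@' then ['_'] else [x]))
            (if x = ' ' then ['_'] else [x]))
          (if x = '-' then ['_'] else [x]))
        (if x = '/' then ['_'] else [x]))
      (if c = '_' then ['_','_'] else [c])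
    = pvTr rd c := by
  unfold pvTr
  by_cases h1 : c = '_'
  · subst h1; cases rd <;> simp
  · by_cases h2 : c = '/' ∨ c = '-' ∨ c = ' ' ∨ c = '@' ∨ c = '+'
    · rcases h2 with h | h | h | h | h <;> subst h <;> cases rd <;> simp
    · rw [not_or, not_or, not_or, not_or] at h2
      obtain ⟨n1, n2, n3, n4, n5⟩ := h2
      by_cases h3 : c = '.'
      · subst h3; cases rd <;> simp
      · cases rd <;> simp [h1, n1, n2, n3, n4, n5, h3]

-- A before truncation = '_' ++ flatMap pvTr
theorem pre_trunc_eq (string : String) (rd : Bool) :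
    (let ret := PySem.Str.replace string "_" "__"
     let ret := ["/", "-", " ", "@", "+"].foldl (fun r s => PySem.Str.replace r s "_") ret
     let ret := if rd then PySem.Str.replace ret "." "" else ret
     ("_" ++ ret : String))
      = "_" ++ String.ofList (string.toList.flatMap (pvTr rd)) := by
  rw [← String.toList_inj]
  simp only [List.foldl, String.toList_append, String.toList_ofList]
  congr 1
  have hstep : ∀ (s : String), (if rd then PySem.Str.replace s "." "" else s).toList
      = s.toList.flatMap (fun x => if rd = true then (if x = '.' then ([] : List Char) else [x]) else [x]) := by
    intro s
    cases rd
    · simp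
    · simp only [if_true, PySem.Str.toList_replace]
      rw [show ("." : String).toList = ['.'] from rfl, show ("" : String).toList = ([] : List Char) from rfl,
        replace_single]
  rw [hstep]
  simp only [PySem.Str.toList_replace]
  rw [show ("__" : String).toList = ['_','_'] from rfl]
  simp only [show ("_" : String).toList = ['_'] from rfl,
    show ("/" : String).toList = ['/'] from rfl, show ("-" : String).toList = ['-'] from rfl,
    show (" " : String).toList = [' '] from rfl, show ("@" : String).toList = ['@'] from rfl,
    show ("+" : String).toList = ['+'] from rfl]
  simp only [replace_single, List.flatMap_assoc]
  exact List.flatMap_congr (fun c _ => comp_tr rd c)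

-- one loop step of B appends exactly pvTr
theorem stepB_eq (rd : Bool) (c : Char) (out : List Char) :
    (if c = '_' then out ++ ['_', '_']
      else if c = '/' ∨ c = '-' ∨ c = ' ' ∨ c = '@' ∨ c = '+' then out ++ ['_']
      else if c = '.' ∧ rd then out
      else out ++ [c]) = out ++ pvTr rd c := by
  unfold pvTr
  by_cases h1 : c = '_'
  · simp [h1]
  · by_cases h2 : c = '/' ∨ c = '-' ∨ c = ' ' ∨ c = '@' ∨ c = '+'
    · simp [h1, h2]
    · by_cases h3 : c = '.' ∧ rd = true
      · simp [h3.1, h3.2]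
      · have : ¬ (rd = true ∧ c = '.') := fun h => h3 ⟨h.2, h.1⟩
        simp [h1, h2, h3, this]

-- B's loop computes truncate-at-the-end of the full image, given the invariant |out| ≤ 38
theorem goB_eq (rd : Bool) : ∀ (s : List Char) (out : List Char), out.length ≤ 38 →
    pvGoB rd s out =
      (let full := out ++ s.flatMap (pvTr rd)
       if full.length > 38 then full.take 37 else full) := by
  intro s
  induction s with
  | nil => intro out h; simp [pvGoB, Nat.not_lt.mpr h]
  | cons c rest ih =>
    intro out h
    simp only [pvGoB, stepB_eq]
    by_cases hb : (out ++ pvTr rd c).length > 38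
    · rw [if_pos hb]
      have hfull : (out ++ (c :: rest).flatMap (pvTr rd)).length > 38 := by
        simp only [List.flatMap_cons, List.length_append] at hb ⊢
        omega
      rw [if_pos hfull]
      have h37 : 37 ≤ (out ++ pvTr rd c).length := by omega
      simp only [List.flatMap_cons, ← List.append_assoc]
      rw [List.take_append_of_le_length h37]
    · rw [if_neg hb, ih _ (Nat.not_lt.mp hb)]
      simp [List.flatMap_cons]

-- ===== VERDICT (by name: the statement is the Claim_ definition above) =====
theorem format_id_py_spec : Claim_equal_format_id_py := by
  intro string rd _
  unfold Spec_format_id_py format_id_py format_id_py_alt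
  simp only []
  rw [pre_trunc_eq, goB_eq rd string.toList ['_'] (by simp)]
  set fm := string.toList.flatMap (pvTr rd) with hfm
  have htl : ("_" ++ String.ofList fm).toList = '_' :: fm := by simp
  have hlen : PySem.Str.len ("_" ++ String.ofList fm) = ((fm.length + 1 : Nat) : Int) := by
    rw [PySem.Str.len_eq, htl]; simp
  simp only [List.singleton_append, List.length_cons]
  by_cases hb : fm.length + 1 > 38
  · rw [if_pos (by rw [hlen]; exact_mod_cast hb), if_pos hb]
    rw [← String.toList_inj, PySem.Str.toList_slice, htl]
    rw [show ((0 : Int)) = ((0 : Nat) : Int) from rfl, show ((37 : Int)) = ((37 : Nat) : Int) from rfl]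
    simp only [PySem.Chars.slice]
    rw [PySem.List.slice_natCast]
    simp
  · rw [if_neg (by rw [hlen]; exact_mod_cast hb), if_neg hb]
    rw [← String.toList_inj, htl]
    simp
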